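-- pv_equiv track=rewrite | github.com/nowellclosser/dailycodingproblem | 11-17-2018-staircase.py | num_routes
-- ===== SOURCE A (Python) =====
-- CACHED_NUM_ROUTES = {}
--
-- def num_routes(num_steps):
--     ''' This is just memoized fibonacci '''
--     if CACHED_NUM_ROUTES.get(num_steps):
--         return CACHED_NUM_ROUTES[num_steps]
--     if num_steps in (1,2):
--         return num_steps
--
--     result1 = num_routes(num_steps - 1)
--     result2 = num_routes(num_steps - 2)
--
--     result = result1 + result2
--     CACHED_NUM_ROUTES[num_steps] = result
--     return result
-- ===== SOURCE B (Python) =====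
-- def num_routes(num_steps):
--     ''' Fast-doubling Fibonacci: num_routes(n) = fib(n+1) with fib(1)=fib(2)=1 '''
--     def fib_pair(k):
--         # returns (fib(k), fib(k+1))
--         if k <= 0:
--             return (0, 1)
--         a, b = fib_pair(k >> 1)
--         c = a * (2 * b - a)
--         d = a * a + b * b
--         if k & 1:
--             return (d, c + d)
--         return (c, d)
--     return fib_pair(num_steps + 1)[0]
-- ===== Notes on version B (the rewrite author's own statement) =====
-- stated objective: faster
-- what changed: Replaces the linear memoized-recursion Fibonacci with fast-doubling Fibonacci (num_routes of n is fib of n+1), O(log n) arithmetic steps; measured an order of magnitude faster at the largest size both complete (beyond that A itself hits Python's recursion limit while B still returns).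
-- outside the precondition, e.g. on num_routes(0): A raises RecursionError, B returns 1
import Mathlib
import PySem

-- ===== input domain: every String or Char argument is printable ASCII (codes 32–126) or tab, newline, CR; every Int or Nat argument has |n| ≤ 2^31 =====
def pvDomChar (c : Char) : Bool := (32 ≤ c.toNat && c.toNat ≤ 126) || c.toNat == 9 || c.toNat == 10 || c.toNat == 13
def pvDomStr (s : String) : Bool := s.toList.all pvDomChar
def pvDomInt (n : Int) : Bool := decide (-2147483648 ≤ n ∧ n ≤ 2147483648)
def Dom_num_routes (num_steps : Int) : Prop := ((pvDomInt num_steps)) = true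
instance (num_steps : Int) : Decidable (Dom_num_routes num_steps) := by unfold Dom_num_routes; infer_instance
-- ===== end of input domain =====

-- B replaces A's O(n) memoized-recursion Fibonacci by O(log n) fast-doubling Fibonacci
-- (num_routes n = fib (n+1)); equivalence is about the RETURN value only (A also fills a
-- global memo dict, which B does not).

-- ===== PORT A =====
-- A's global memo dict CACHED_NUM_ROUTES is threaded through the recursion as an explicit
-- cache parameter (result, updated cache); each top-level call starts from the empty dict —
-- the memo only stores values the recursion itself computes, so the returned value is the
-- same as with the persistent global. 'CACHED_NUM_ROUTES.get(num_steps)' truthiness is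
-- 'getD num_steps 0 ≠ 0' (cached values are positive ints, never 0/None-falsy-collision).
-- The 'num_steps ≤ 0' guard only makes the recursion total (Python recurses forever there;
-- outside Pre_).
def numRoutesMemo (cache : PySem.Dict Int Int) (num_steps : Int) : Int × PySem.Dict Int Int :=
  if num_steps ≤ 0 then (0, cache)
  else if cache.getD num_steps 0 ≠ 0 then (cache.getD num_steps 0, cache)
  else if num_steps = 1 ∨ num_steps = 2 then (num_steps, cache)
  else
    let r1 := numRoutesMemo cache (num_steps - 1)
    let r2 := numRoutesMemo r1.2 (num_steps - 2)
    let result := r1.1 + r2.1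
    (result, r2.2.insert num_steps result)
termination_by num_steps.toNat
decreasing_by all_goals omega

def num_routes (num_steps : Int) : Int := (numRoutesMemo PySem.Dict.empty num_steps).1

-- ===== PORT B =====
-- fib_pair k = (fib k, fib (k+1)) by fast doubling; 'k ≤ 0' is B's own base case.
def fibPair (k : Int) : Int × Int :=
  if k ≤ 0 then (0, 1)
  else
    let p := fibPair (k / 2)   -- k > 0, so '/' agrees with Python's k >> 1
    let a := p.1
    let b := p.2
    let c := a * (2 * b - a)
    let d := a * a + b * b
    if k % 2 = 1 then (d, c + d) else (c, d)
termination_by k.toNat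
decreasing_by omega

def num_routes_alt (num_steps : Int) : Int := (fibPair (num_steps + 1)).1

-- ===== PRECONDITION & SPEC =====
-- Pre_ excludes num_steps ≤ 0, where Python A recurses without a base case and raises RecursionError.
def Pre_num_routes (num_steps : Int) : Prop := 1 ≤ num_steps
instance (num_steps : Int) : Decidable (Pre_num_routes num_steps) := by unfold Pre_num_routes; infer_instance
def pvWitness_num_routes : Int := 7

def Spec_num_routes (num_steps : Int) (out : Int) : Prop := out = num_routes_alt num_steps
instance (num_steps : Int) (out : Int) : Decidable (Spec_num_routes num_steps out) := by unfold Spec_num_routes; infer_instance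

-- ===== CLAIM (what is proved, stated in full; the proofs are below) =====
def Claim_equal_num_routes : Prop := ∀ (num_steps : Int), Dom_num_routes num_steps → Pre_num_routes num_steps → Spec_num_routes num_steps (num_routes num_steps)

-- ===== LEMMAS AND PROOFS =====

-- every cached value is the corresponding shifted Fibonacci number
def CacheInv (c : PySem.Dict Int Int) : Prop :=
  ∀ k v, c.get? k = some v → v = (Nat.fib (k.toNat + 1) : Int)

theorem fib_step (n : Int) (k : Nat) (h3 : 3 ≤ n) (hk : n.toNat = k + 2) :
    (Nat.fib ((n - 1).toNat + 1) : Int) + (Nat.fib ((n - 2).toNat + 1) : Int)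
      = (Nat.fib (n.toNat + 1) : Int) := by
  have e1 : (n - 1).toNat = k + 1 := by omega
  have e2 : (n - 2).toNat = k := by omega
  rw [e1, e2, hk]
  have : Nat.fib (k + 3) = Nat.fib (k + 1) + Nat.fib (k + 2) := Nat.fib_add_two
  push_cast [show k + 2 + 1 = k + 3 from rfl, this]
  ring

-- A computes the shifted Fibonacci number fib (n+1), and keeps the cache invariant.
theorem memo_correct : ∀ (m : Nat) (n : Int) (c : PySem.Dict Int Int), n.toNat = m → 1 ≤ n →
    CacheInv c →
    (numRoutesMemo c n).1 = (Nat.fib (n.toNat + 1) : Int) ∧ CacheInv (numRoutesMemo c n).2 := by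
  intro m
  induction m using Nat.strong_induction_on with
  | _ m ih =>
    intro n c hm hn hc
    rw [numRoutesMemo, if_neg (by omega)]
    by_cases hhit : c.getD n 0 ≠ 0
    · rw [if_pos hhit]
      cases hg : c.get? n with
      | none =>
        exact absurd (by rw [PySem.Dict.getD_eq_get?_getD, hg]; rfl) hhit
      | some v =>
        refine ⟨?_, hc⟩
        show c.getD n 0 = _
        rw [PySem.Dict.getD_eq_get?_getD, hg]
        exact hc n v hg
    · rw [if_neg hhit]
      by_cases h12 : n = 1 ∨ n = 2
      · rw [if_pos h12]
        refine ⟨?_, hc⟩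
        rcases h12 with h | h <;> subst h
        · norm_num [show ((1 : Int)).toNat = 1 from rfl, show Nat.fib 2 = 1 from rfl]
        · norm_num [show ((2 : Int)).toNat = 2 from rfl, show Nat.fib 3 = 2 from rfl]
      · rw [if_neg h12]
        have h3 : 3 ≤ n := by omega
        have h1 := ih (m - 1) (by omega) (n - 1) c (by omega) (by omega) hc
        have h2 := ih (m - 2) (by omega) (n - 2) (numRoutesMemo c (n - 1)).2 (by omega)
          (by omega) h1.2
        obtain ⟨k, hk⟩ : ∃ k : Nat, n.toNat = k + 2 := ⟨n.toNat - 2, by omega⟩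
        constructor
        · show (numRoutesMemo c (n - 1)).1
              + (numRoutesMemo (numRoutesMemo c (n - 1)).2 (n - 2)).1 = _
          rw [h1.1, h2.1]
          exact fib_step n k h3 hk
        · show CacheInv (((numRoutesMemo (numRoutesMemo c (n - 1)).2 (n - 2)).2).insert n _)
          intro k' v hkv
          rw [PySem.Dict.get?_insert] at hkv
          by_cases hkn : k' = n
          · rw [if_pos hkn] at hkv
            subst hkn
            cases hkv
            rw [h1.1, h2.1]
            exact fib_step k' k h3 hk
          · rw [if_neg hkn] at hkv
            exact h2.2 k' v hkv

theorem cacheInv_empty : CacheInv PySem.Dict.empty := by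
  intro k v h
  rw [PySem.Dict.get?_empty] at h
  cases h

-- fast doubling computes (fib k, fib (k+1)).
theorem fibPair_eq : ∀ (m : Nat) (k : Int), k.toNat = m → 0 ≤ k →
    fibPair k = ((Nat.fib m : Int), (Nat.fib (m + 1) : Int)) := by
  intro m
  induction m using Nat.strong_induction_on with
  | _ m ih =>
    intro k hm hk
    rw [fibPair]
    by_cases hk0 : k ≤ 0
    · rw [if_pos hk0]
      have : m = 0 := by omega
      subst this; decide
    · rw [if_neg hk0]
      have hrec := ih (m / 2) (by omega) (k / 2) (by omega) (by omega)
      set h := m / 2 with hh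
      have hle : Nat.fib h ≤ 2 * Nat.fib (h + 1) :=
        le_trans Nat.fib_le_fib_succ (by omega)
      have hc : (Nat.fib (2 * h) : Int) =
          (Nat.fib h : Int) * (2 * (Nat.fib (h + 1) : Int) - (Nat.fib h : Int)) := by
        rw [Nat.fib_two_mul]; push_cast [hle]; ring
      have hd : (Nat.fib (2 * h + 1) : Int) =
          (Nat.fib h : Int) * (Nat.fib h : Int) + (Nat.fib (h + 1) : Int) * (Nat.fib (h + 1) : Int) := by
        rw [Nat.fib_two_mul_add_one]; push_cast; ring
      have hsum : (Nat.fib (2 * h + 2) : Int) = (Nat.fib (2 * h) : Int) + (Nat.fib (2 * h + 1) : Int) := by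
        exact_mod_cast congrArg (Nat.cast (R := Int)) (Nat.fib_add_two (n := 2 * h))
      simp only [hrec]
      by_cases hpar : k % 2 = 1
      · rw [if_pos hpar]
        have hm2 : m = 2 * h + 1 := by omega
        rw [hm2]
        simp only [Prod.mk.injEq]
        refine ⟨by rw [hd], ?_⟩
        rw [show 2 * h + 1 + 1 = 2 * h + 2 from rfl, hsum, hc, hd]
      · rw [if_neg hpar]
        have hm2 : m = 2 * h := by omega
        rw [hm2]
        simp only [Prod.mk.injEq]
        exact ⟨by rw [hc], by rw [hd]⟩

theorem num_routes_alt_fib (n : Int) (hn : -1 ≤ n) :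
    num_routes_alt n = (Nat.fib ((n + 1).toNat) : Int) := by
  unfold num_routes_alt
  rw [fibPair_eq (n + 1).toNat (n + 1) rfl (by omega)]

-- ===== VERDICT (by name: the statement is the Claim_ definition above) =====
theorem num_routes_spec : Claim_equal_num_routes := by
  intro n _ hpre
  have hn : 1 ≤ n := hpre
  unfold Spec_num_routes
  unfold num_routes
  rw [(memo_correct n.toNat n PySem.Dict.empty rfl hn cacheInv_empty).1,
      num_routes_alt_fib n (by omega)]
  congr 2
  omega
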